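-- pv_equiv track=rewrite | github.com/sergrehsaharcuk-code/telegram-bspac-bot | bot.py | normalize_for_profanity
-- ===== SOURCE A (Python) =====
-- def normalize_for_profanity(text):
--     replacements = {
--         'x': 'х', 'X': 'Х', 'b': 'б', 'B': 'Б', '3': 'з', '0': 'о', '@': 'а',
--         'y': 'у', 'Y': 'У', 'c': 'с', 'C': 'С', 'e': 'е', 'E': 'Е', 'a': 'а',
--         'A': 'А', 'o': 'о', 'O': 'О', 'p': 'р', 'P': 'Р', 'k': 'к', 'K': 'К',
--         'm': 'м', 'M': 'М', 'n': 'н', 'N': 'Н', 't': 'т', 'T': 'Т',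
--     }
--     for lat, rus in replacements.items():
--         text = text.replace(lat, rus)
--     return text.lower()
-- ===== SOURCE B (Python) =====
-- def normalize_for_profanity(text):
--     table = {
--         'x': 'х', 'b': 'б', '3': 'з', '0': 'о', '@': 'а',
--         'y': 'у', 'c': 'с', 'e': 'е', 'a': 'а', 'o': 'о',
--         'p': 'р', 'k': 'к', 'm': 'м', 'n': 'н', 't': 'т',
--     }
--     return ''.join(table.get(c, c) for c in text.lower())
-- ===== Notes on version B (the rewrite author's own statement) =====
-- stated objective: idiomatic
-- what changed: A rescans the whole string 27 times with str.replace (one pass per case-sensitive rule) and lowercases last; B lowercases FIRST, which merges the 27 rules into a 15-entry lowercase-only table, and then does a single character-wise pass with table.get(c, c).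
import Mathlib
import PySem

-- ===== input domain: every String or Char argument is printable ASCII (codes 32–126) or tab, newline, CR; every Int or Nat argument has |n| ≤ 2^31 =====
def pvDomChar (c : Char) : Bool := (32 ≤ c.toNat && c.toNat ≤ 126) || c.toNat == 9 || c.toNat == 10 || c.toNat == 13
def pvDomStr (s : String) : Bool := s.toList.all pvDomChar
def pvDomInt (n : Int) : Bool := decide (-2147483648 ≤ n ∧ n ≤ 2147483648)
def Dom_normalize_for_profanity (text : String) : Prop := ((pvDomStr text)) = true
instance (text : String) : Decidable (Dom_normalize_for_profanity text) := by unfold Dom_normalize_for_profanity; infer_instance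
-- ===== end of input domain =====

-- B lowercases first, merging A's 27 case-sensitive rules (27 whole-string str.replace
-- scans, then .lower()) into one 15-entry lowercase table applied in a single pass
-- (idiomatic; return value only, no side effects).

-- ===== PORT A =====
-- the replacement table (A's literal, in A's order)
def pvRules : List (Char × Char) :=
  [('x', 'х'), ('X', 'Х'), ('b', 'б'), ('B', 'Б'), ('3', 'з'), ('0', 'о'), ('@', 'а'),
   ('y', 'у'), ('Y', 'У'), ('c', 'с'), ('C', 'С'), ('e', 'е'), ('E', 'Е'), ('a', 'а'),
   ('A', 'А'), ('o', 'о'), ('O', 'О'), ('p', 'р'), ('P', 'Р'), ('k', 'к'), ('K', 'К'),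
   ('m', 'м'), ('M', 'М'), ('n', 'н'), ('N', 'Н'), ('t', 'т'), ('T', 'Т')]

-- str.replace with a 1-char pattern and a 1-char replacement: exactly a pointwise map
-- (exact here: every rule replaces one character by one character)
def pvReplace1 (s : List Char) (p r : Char) : List Char :=
  s.map (fun x => if x = p then r else x)

-- Python str.lower() as A applies it, hand-ported: exact on ASCII and on Cyrillic
-- А..Я (U+0410..U+042F), the only characters A's intermediate string can contain here
def pvLower (c : Char) : Char :=
  if 'A' ≤ c ∧ c ≤ 'Z' then Char.ofNat (c.toNat + 32)
  else if 'А' ≤ c ∧ c ≤ 'Я' then Char.ofNat (c.toNat + 32)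
  else c

def normalize_for_profanity (text : String) : String :=
  let t := pvRules.foldl (fun s pr => pvReplace1 s pr.1 pr.2) text.toList
  String.mk (t.map pvLower)

-- ===== PORT B =====
-- B's merged lowercase-only table (B's literal, in B's order)
def pvTable : PySem.Dict Char Char :=
  PySem.Dict.ofList
    [('x', 'х'), ('b', 'б'), ('3', 'з'), ('0', 'о'), ('@', 'а'),
     ('y', 'у'), ('c', 'с'), ('e', 'е'), ('a', 'а'), ('o', 'о'),
     ('p', 'р'), ('k', 'к'), ('m', 'м'), ('n', 'н'), ('t', 'т')]

-- B's single pass: one table.get(c, c) lookup per character of the lowered text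
def pvPass : List Char → List Char
  | [] => []
  | c :: cs => pvTable.getD c c :: pvPass cs

def normalize_for_profanity_alt (text : String) : String :=
  String.mk (pvPass (PySem.Str.lower text).toList)

-- ===== PRECONDITION & SPEC =====
def Spec_normalize_for_profanity (text : String) (out : String) : Prop := out = normalize_for_profanity_alt text
instance (text : String) (out : String) : Decidable (Spec_normalize_for_profanity text out) := by unfold Spec_normalize_for_profanity; infer_instance

-- ===== CLAIM =====
def Claim_equal_normalize_for_profanity : Prop := ∀ (text : String), Dom_normalize_for_profanity text → Spec_normalize_for_profanity text (normalize_for_profanity text)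

-- ===== LEMMAS AND PROOFS =====

-- a fold of pointwise maps is a map of the folded per-character function
theorem foldl_replace1_eq_map (rs : List (Char × Char)) (l : List Char) :
    rs.foldl (fun s pr => pvReplace1 s pr.1 pr.2) l
      = l.map (fun c => rs.foldl (fun x pr => if x = pr.1 then pr.2 else x) c) := by
  induction rs generalizing l with
  | nil => simp
  | cons h t ih =>
    simp only [List.foldl_cons]
    rw [ih, pvReplace1, List.map_map]
    rfl

-- B's pass is the pointwise lookup map
theorem pvPass_eq_map (l : List Char) :
    pvPass l = l.map (fun c => pvTable.getD c c) := by
  induction l with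
  | nil => rfl
  | cons c cs ih => simp [pvPass, ih]

-- per character, on domain codes: A's chain-then-lower equals B's lower-then-lookup
set_option maxRecDepth 8000 in
theorem char_agree_fin :
    ∀ n : Fin 127, pvDomChar (Char.ofNat n.val) = true →
      pvLower (pvRules.foldl (fun x pr => if x = pr.1 then pr.2 else x) (Char.ofNat n.val))
        = pvTable.getD (PySem.Chars.lowerChar (Char.ofNat n.val))
            (PySem.Chars.lowerChar (Char.ofNat n.val)) := by
  decide

theorem char_agree (c : Char) (h : pvDomChar c = true) :
    pvLower (pvRules.foldl (fun x pr => if x = pr.1 then pr.2 else x) c)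
      = pvTable.getD (PySem.Chars.lowerChar c) (PySem.Chars.lowerChar c) := by
  have hlt : c.toNat < 127 := by
    unfold pvDomChar at h
    simp only [Bool.or_eq_true, Bool.and_eq_true, decide_eq_true_eq, beq_iff_eq] at h
    omega
  have := char_agree_fin ⟨c.toNat, hlt⟩ (by simpa [Char.ofNat_toNat] using h)
  simpa [Char.ofNat_toNat] using this

-- ===== VERDICT =====
set_option maxHeartbeats 1600000 in
set_option maxRecDepth 16000 in
theorem normalize_for_profanity_spec : Claim_equal_normalize_for_profanity := by
  intro text hdom
  unfold Spec_normalize_for_profanity normalize_for_profanity normalize_for_profanity_alt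
  rw [pvPass_eq_map, foldl_replace1_eq_map]
  simp only [PySem.Str.toList_lower, PySem.Chars.lower, List.map_map]
  apply congrArg
  apply List.map_congr_left
  intro c hc
  simp only [Function.comp_apply]
  have h : pvDomChar c = true := by
    unfold Dom_normalize_for_profanity pvDomStr at hdom
    exact List.all_eq_true.mp hdom c hc
  exact char_agree c h
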